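-- pv_equiv track=rewrite | github.com/davideo4c/cueCleric | export_cues_csv.py | stem_without_known_extension
-- ===== SOURCE A (Python) =====
-- def stem_without_known_extension(filename: str) -> str:
--     first = (filename or "").strip()
--     if not first:
--         return ""
--     lower = first.lower()
--     for ext in sorted(_MEDIA_EXT_SUFFIXES, key=len, reverse=True):
--         if lower.endswith(ext):
--             return first[: len(first) - len(ext)]
--     return first
--
-- _MEDIA_EXT_SUFFIXES = frozenset(
--     {
--         ".mov",
--         ".mp4",
--         ".m4v",
--         ".mxf",
--         ".avi",
--         ".mkv",
--         ".webm",
--         ".wmv",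
--         ".png",
--         ".jpg",
--         ".jpeg",
--         ".tif",
--         ".tiff",
--         ".tga",
--         ".exr",
--         ".dpx",
--         ".gif",
--         ".bmp",
--         ".heic",
--         ".svg",
--     }
-- )
-- ===== SOURCE B (Python) =====
-- _MEDIA_EXT_SUFFIXES = frozenset(
--     {
--         ".mov", ".mp4", ".m4v", ".mxf", ".avi", ".mkv", ".webm", ".wmv",
--         ".png", ".jpg", ".jpeg", ".tif", ".tiff", ".tga", ".exr", ".dpx",
--         ".gif", ".bmp", ".heic", ".svg",
--     }
-- )
--
--
-- def stem_without_known_extension(filename: str) -> str: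
--     first = (filename or "").strip()
--     if not first:
--         return ""
--     idx = first.rfind('.')
--     if idx != -1 and first[idx:].lower() in _MEDIA_EXT_SUFFIXES:
--         return first[:idx]
--     return first
-- ===== Notes on version B (the rewrite author's own statement) =====
-- stated objective: simpler
-- what changed: Instead of sorting the suffix table by length and scanning it with endswith on every call, B locates the last dot with rfind and does a single set-membership test on that one candidate suffix, dropping the per-call sorted() loop entirely.
import Mathlib
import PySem

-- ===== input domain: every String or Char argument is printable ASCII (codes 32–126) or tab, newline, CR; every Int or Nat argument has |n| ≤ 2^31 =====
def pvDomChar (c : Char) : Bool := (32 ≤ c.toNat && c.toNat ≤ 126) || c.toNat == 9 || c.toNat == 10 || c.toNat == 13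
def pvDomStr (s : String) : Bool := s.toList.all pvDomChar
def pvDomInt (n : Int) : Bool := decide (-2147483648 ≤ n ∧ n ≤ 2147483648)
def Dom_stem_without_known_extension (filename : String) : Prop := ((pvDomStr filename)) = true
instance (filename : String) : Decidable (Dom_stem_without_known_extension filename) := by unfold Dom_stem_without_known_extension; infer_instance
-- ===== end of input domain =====

-- B strips the known media extension by locating the last dot with rfind and one set
-- membership test, instead of A's per-call sorted() loop of endswith checks (objective: simpler).

-- ===== PORT A =====
-- the module constant _MEDIA_EXT_SUFFIXES (a frozenset literal)
def pvMediaSuffixesA : PySem.Set String :=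
  PySem.Set.ofList [".mov", ".mp4", ".m4v", ".mxf", ".avi", ".mkv", ".webm", ".wmv",
    ".png", ".jpg", ".jpeg", ".tif", ".tiff", ".tga", ".exr", ".dpx",
    ".gif", ".bmp", ".heic", ".svg"]

-- A's 'for ext in …: if lower.endswith(ext): return …' loop: first matching suffix
def pvFirstMatch (lower : String) : List String → Option String
  | [] => none
  | e :: rest => if PySem.Str.endswith lower e then some e else pvFirstMatch lower rest

def stem_without_known_extension (filename : String) : String :=
  let first := PySem.Str.strip filename
  if first = "" then ""
  else
    let lower := PySem.Str.lower first
    match pvFirstMatch lower (PySem.List.sorted pvMediaSuffixesA (fun s => PySem.Str.len s) true) with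
    | some ext => PySem.Str.slice first none (some (PySem.Str.len first - PySem.Str.len ext))
    | none => first

-- ===== PORT B =====
def pvMediaSuffixesB : PySem.Set String :=
  PySem.Set.ofList [".mov", ".mp4", ".m4v", ".mxf", ".avi", ".mkv", ".webm", ".wmv",
    ".png", ".jpg", ".jpeg", ".tif", ".tiff", ".tga", ".exr", ".dpx",
    ".gif", ".bmp", ".heic", ".svg"]

def stem_without_known_extension_alt (filename : String) : String :=
  let first := PySem.Str.strip filename
  if first = "" then ""
  else
    let idx := PySem.Str.rfind first "."
    if idx ≠ -1 ∧ PySem.Set.contains pvMediaSuffixesB (PySem.Str.lower (PySem.Str.slice first (some idx) none)) = true then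
      PySem.Str.slice first none (some idx)
    else first

-- ===== PRECONDITION & SPEC =====
def Spec_stem_without_known_extension (filename : String) (out : String) : Prop := out = stem_without_known_extension_alt filename
instance (filename : String) (out : String) : Decidable (Spec_stem_without_known_extension filename out) := by unfold Spec_stem_without_known_extension; infer_instance

-- ===== CLAIM (what is proved, stated in full; the proofs are below) =====
def Claim_equal_stem_without_known_extension : Prop := ∀ (filename : String), Dom_stem_without_known_extension filename → Spec_stem_without_known_extension filename (stem_without_known_extension filename)

-- ===== LEMMAS AND PROOFS =====

-- the sorted(…, key=len, reverse=True) order of the suffix table, as a literal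
def pvSortedLit : List String :=
  [".webm", ".jpeg", ".tiff", ".heic", ".mov", ".mp4", ".m4v", ".mxf", ".avi", ".mkv",
   ".wmv", ".png", ".jpg", ".tif", ".tga", ".exr", ".dpx", ".gif", ".bmp", ".svg"]

lemma pv_sorted_eq :
    PySem.List.sorted pvMediaSuffixesA (fun s => PySem.Str.len s) true = pvSortedLit := by
  decide

-- every table entry is a dot followed by a dot-free tail
lemma pv_ext_shape (e : String) (he : e ∈ pvSortedLit) :
    ∃ w : List Char, e.toList = '.' :: w ∧ '.' ∉ w := by
  fin_cases he <;> exact ⟨_, rfl, by decide⟩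

-- membership in B's frozenset agrees with membership in the sorted literal
lemma pv_memB_iff (s : String) :
    PySem.Set.contains pvMediaSuffixesB s = true ↔ s ∈ pvSortedLit := by
  have h : pvMediaSuffixesB = [".mov", ".mp4", ".m4v", ".mxf", ".avi", ".mkv", ".webm", ".wmv",
    ".png", ".jpg", ".jpeg", ".tif", ".tiff", ".tga", ".exr", ".dpx", ".gif", ".bmp", ".heic", ".svg"] := by
    decide
  rw [h]
  simp only [PySem.Set.contains, List.contains_iff_mem, pvSortedLit, List.mem_cons,
    List.not_mem_nil, or_false]
  tauto

lemma pv_singleton_prefix (c : Char) (l : List Char) : [c] <+: l ↔ l.head? = some c := by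
  cases l with
  | nil => simp
  | cons b bs => simp [List.cons_prefix_cons, eq_comm]

lemma pv_isPrefixOf_drop (t : List Char) (i : Nat) :
    List.isPrefixOf ['.'] (t.drop i) = true ↔ t[i]? = some '.' := by
  have hh : (List.drop i t).head? = t[i]? := List.head?_drop
  rw [List.isPrefixOf_iff_prefix, pv_singleton_prefix, hh]

-- spec of PySem.Chars.rfind.go for sub = ['.']
lemma pv_go_cases (t : List Char) (j : Nat) :
    (PySem.Chars.rfind.go t ['.'] j = -1 ∧ ∀ i ≤ j, t[i]? ≠ some '.')
    ∨ ∃ k : Nat, k ≤ j ∧ PySem.Chars.rfind.go t ['.'] j = k ∧ t[k]? = some '.' ∧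
        ∀ i, k < i → i ≤ j → t[i]? ≠ some '.' := by
  induction j with
  | zero =>
    by_cases h : t[0]? = some '.'
    · right
      refine ⟨0, le_refl 0, ?_, h, fun i h1 h2 => by omega⟩
      have hp : List.isPrefixOf ['.'] t = true := by
        have := (pv_isPrefixOf_drop t 0).mpr h
        simpa using this
      simp [PySem.Chars.rfind.go, hp]
    · left
      have hp : List.isPrefixOf ['.'] t = false := by
        rw [Bool.eq_false_iff]
        intro hh
        exact h ((pv_isPrefixOf_drop t 0).mp (by simpa using hh))
      refine ⟨by simp [PySem.Chars.rfind.go, hp], ?_⟩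
      intro i hi
      have : i = 0 := Nat.le_zero.mp hi
      subst this
      exact h
  | succ j ih =>
    by_cases h : t[j+1]? = some '.'
    · right
      have hp := (pv_isPrefixOf_drop t (j+1)).mpr h
      exact ⟨j+1, le_refl _, by simp [PySem.Chars.rfind.go, hp], h, fun i h1 h2 => by omega⟩
    · have hp : List.isPrefixOf ['.'] (t.drop (j+1)) = false := by
        rw [Bool.eq_false_iff]
        exact fun hh => h ((pv_isPrefixOf_drop t (j+1)).mp hh)
      have hgo : PySem.Chars.rfind.go t ['.'] (j+1) = PySem.Chars.rfind.go t ['.'] j := by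
        simp [PySem.Chars.rfind.go, hp]
      rcases ih with ⟨h1, h2⟩ | ⟨k, hk, hgk, hdot, hafter⟩
      · left
        refine ⟨by rw [hgo]; exact h1, ?_⟩
        intro i hi
        rcases Nat.lt_or_ge i (j+1) with hlt | hge
        · exact h2 i (by omega)
        · have : i = j+1 := by omega
          subst this; exact h
      · right
        refine ⟨k, by omega, by rw [hgo]; exact hgk, hdot, ?_⟩
        intro i h1 h2'
        rcases Nat.lt_or_ge i (j+1) with hlt | hge
        · exact hafter i h1 (by omega)
        · have : i = j+1 := by omega
          subst this; exact h

lemma pv_rfind_neg (t : List Char) (h : PySem.Chars.rfind t ['.'] = -1) :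
    ∀ i : Nat, t[i]? ≠ some '.' := by
  intro i
  have hr : PySem.Chars.rfind t ['.'] = PySem.Chars.rfind.go t ['.'] t.length := rfl
  rcases pv_go_cases t t.length with ⟨h1, h2⟩ | ⟨k, hk, hgk, _, _⟩
  · rcases Nat.lt_or_ge t.length i with hgt | hle
    · simp [List.getElem?_eq_none (by omega : t.length ≤ i)]
    · exact h2 i hle
  · rw [hr, hgk] at h
    exact absurd h (by omega)

lemma pv_rfind_pos (t : List Char) (h : PySem.Chars.rfind t ['.'] ≠ -1) :
    ∃ k : Nat, PySem.Chars.rfind t ['.'] = k ∧ t[k]? = some '.' ∧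
      ∀ i : Nat, k < i → t[i]? ≠ some '.' := by
  have hr : PySem.Chars.rfind t ['.'] = PySem.Chars.rfind.go t ['.'] t.length := rfl
  rcases pv_go_cases t t.length with ⟨h1, _⟩ | ⟨k, hk, hgk, hdot, hafter⟩
  · exact absurd (hr.trans h1) h
  · refine ⟨k, hr.trans hgk, hdot, ?_⟩
    intro i hlt
    rcases Nat.lt_or_ge t.length i with hgt | hle
    · simp [List.getElem?_eq_none (by omega : t.length ≤ i)]
    · exact hafter i hlt hle

-- the last dot of u ++ '.' :: w (w dot-free) sits at position u.length
lemma pv_rfind_last_dot (u w : List Char) (hw : '.' ∉ w) :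
    PySem.Chars.rfind (u ++ '.' :: w) ['.'] = (u.length : Int) := by
  have hdot : (u ++ '.' :: w)[u.length]? = some '.' := by
    rw [List.getElem?_append_right (le_refl _)]
    simp
  have hrne : PySem.Chars.rfind (u ++ '.' :: w) ['.'] ≠ -1 := by
    intro h
    exact absurd hdot (pv_rfind_neg _ h u.length)
  obtain ⟨k, hk, hdk, hafter⟩ := pv_rfind_pos _ hrne
  have hku : k = u.length := by
    by_contra hne
    rcases Nat.lt_or_ge k u.length with hlt | hge
    · exact hafter u.length (by omega) hdot
    · have hgt : u.length < k := by omega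
      have heq : (u ++ '.' :: w)[k]? = w[k - u.length - 1]? := by
        rw [List.getElem?_append_right (by omega)]
        have hm : k - u.length = (k - u.length - 1) + 1 := by omega
        rw [hm]
        simp
      rw [heq] at hdk
      have : '.' ∈ w := by
        obtain ⟨hlt', hval⟩ := List.getElem?_eq_some_iff.mp hdk
        exact hval ▸ List.getElem_mem hlt'
      exact hw this
  rw [hk, hku]

lemma pv_toNat_ofNat (n : Nat) (h : n < 55296) : (Char.ofNat n).toNat = n := by
  have hv : n.isValidChar := Or.inl h
  rw [Char.toNat_ofNat, if_pos hv]

lemma pv_lowerChar_dot (c : Char) : PySem.Chars.lowerChar c = '.' ↔ c = '.' := by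
  unfold PySem.Chars.lowerChar
  split_ifs with h
  · simp only [PySem.Chars.isupper, Bool.and_eq_true, decide_eq_true_eq] at h
    have hb : 65 ≤ c.toNat ∧ c.toNat ≤ 90 := by
      obtain ⟨h1, h2⟩ := h
      rw [Char.le_def] at h1 h2
      exact ⟨h1, h2⟩
    constructor
    · intro hc
      have := congrArg Char.toNat hc
      rw [pv_toNat_ofNat (c.toNat + 32) (by omega)] at this
      have hdot : ('.').toNat = 46 := by decide
      omega
    · intro hc
      subst hc
      exact absurd hb (by decide)
  · simp

lemma pv_firstMatch_none (lower : String) (L : List String) (h : pvFirstMatch lower L = none) :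
    ∀ e ∈ L, PySem.Str.endswith lower e = false := by
  induction L with
  | nil => simp
  | cons a as ih =>
    intro e he
    by_cases ha : PySem.Str.endswith lower a = true
    · rw [pvFirstMatch, if_pos ha] at h
      cases h
    · rw [pvFirstMatch, if_neg ha] at h
      rw [List.mem_cons] at he
      rcases he with rfl | he
      · exact Bool.eq_false_iff.mpr ha
      · exact ih h e he

lemma pv_firstMatch_some (lower : String) (L : List String) (e : String)
    (h : pvFirstMatch lower L = some e) :
    e ∈ L ∧ PySem.Str.endswith lower e = true := by
  induction L with
  | nil => simp [pvFirstMatch] at h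
  | cons a as ih =>
    by_cases ha : PySem.Str.endswith lower a = true
    · rw [pvFirstMatch, if_pos ha] at h
      cases h
      exact ⟨List.mem_cons_self, ha⟩
    · rw [pvFirstMatch, if_neg ha] at h
      rcases ih h with ⟨h1, h2⟩
      exact ⟨List.mem_cons_of_mem _ h1, h2⟩

-- the core equivalence on the stripped string, per outcome of A's loop
lemma pv_core_some (first ext : String)
    (hm : pvFirstMatch (PySem.Str.lower first) pvSortedLit = some ext) :
    PySem.Str.slice first none (some (PySem.Str.len first - PySem.Str.len ext)) =
    (if PySem.Str.rfind first "." ≠ -1 ∧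
        PySem.Set.contains pvMediaSuffixesB
          (PySem.Str.lower (PySem.Str.slice first (some (PySem.Str.rfind first ".")) none)) = true then
      PySem.Str.slice first none (some (PySem.Str.rfind first "."))
    else first) := by
  obtain ⟨hmem, hend⟩ := pv_firstMatch_some _ _ _ hm
  obtain ⟨w, hext, hw⟩ := pv_ext_shape ext hmem
  have hsuf : ext.toList <:+ PySem.Chars.lower first.toList := by
    have h1 : PySem.Chars.endswith (PySem.Chars.lower first.toList) ext.toList = true := by
      rw [PySem.Str.endswith_eq, PySem.Str.toList_lower] at hend
      exact hend
    rw [PySem.Chars.endswith, List.isSuffixOf_iff_suffix] at h1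
    exact h1
  obtain ⟨pre, hpre⟩ := hsuf
  have hlen : first.toList.length = pre.length + ext.toList.length := by
    have hc := congrArg List.length hpre
    simp only [List.length_append, PySem.Chars.lower, List.length_map] at hc
    omega
  have hextpos : 1 ≤ ext.toList.length := by rw [hext]; simp
  have hdroplow : List.map PySem.Chars.lowerChar (first.toList.drop pre.length) = ext.toList := by
    rw [List.map_drop]
    have hmap : List.map PySem.Chars.lowerChar first.toList = pre ++ ext.toList := hpre.symm
    rw [hmap, List.drop_left]
  cases hd : first.toList.drop pre.length with
  | nil =>
    exfalso
    have := congrArg List.length hdroplow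
    rw [hd] at this
    simp only [List.map_nil, List.length_nil] at this
    omega
  | cons c w' =>
    rw [hd] at hdroplow
    rw [hext] at hdroplow
    simp only [List.map_cons, List.cons.injEq] at hdroplow
    obtain ⟨hc, hw'map⟩ := hdroplow
    have hceq : c = '.' := (pv_lowerChar_dot c).mp hc
    have hw' : '.' ∉ w' := by
      intro hmem'
      exact hw (by rw [← hw'map]; exact List.mem_map.mpr ⟨'.', hmem', by decide⟩)
    have hsplit : first.toList = first.toList.take pre.length ++ '.' :: w' := by
      conv_lhs => rw [← List.take_append_drop pre.length first.toList]
      rw [hd, hceq]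
    have htklen : (first.toList.take pre.length).length = pre.length := by
      rw [List.length_take]
      exact Nat.min_eq_left (by omega)
    have hrf : PySem.Chars.rfind first.toList ['.'] = (pre.length : Int) := by
      rw [hsplit, pv_rfind_last_dot _ _ hw', htklen]
    have hidx : PySem.Str.rfind first "." = (pre.length : Int) := by
      rw [PySem.Str.rfind_eq]
      exact hrf
    have hslice : (PySem.Str.slice first (some ((pre.length : Nat) : Int)) none).toList =
        first.toList.drop pre.length := by
      rw [PySem.Str.toList_slice, PySem.Chars.slice_eq_listSlice,
        PySem.List.slice_from _ (by positivity)]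
      simp
    have hlowslice :
        PySem.Str.lower (PySem.Str.slice first (some ((pre.length : Nat) : Int)) none) = ext := by
      apply String.toList_inj.mp
      rw [PySem.Str.toList_lower, hslice]
      show List.map PySem.Chars.lowerChar (first.toList.drop pre.length) = ext.toList
      rw [List.map_drop]
      have hmap : List.map PySem.Chars.lowerChar first.toList = pre ++ ext.toList := hpre.symm
      rw [hmap, List.drop_left]
    have hcond : PySem.Set.contains pvMediaSuffixesB
        (PySem.Str.lower (PySem.Str.slice first (some ((pre.length : Nat) : Int)) none)) = true := by
      rw [hlowslice]
      exact (pv_memB_iff ext).mpr hmem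
    rw [hidx]
    rw [if_pos ⟨by omega, hcond⟩]
    have hlarg : PySem.Str.len first - PySem.Str.len ext = ((pre.length : Nat) : Int) := by
      rw [show PySem.Str.len first = ((first.toList.length : Nat) : Int) from rfl,
        show PySem.Str.len ext = ((ext.toList.length : Nat) : Int) from rfl]
      omega
    rw [hlarg]

lemma pv_core_none (first : String)
    (hm : pvFirstMatch (PySem.Str.lower first) pvSortedLit = none) :
    first =
    (if PySem.Str.rfind first "." ≠ -1 ∧
        PySem.Set.contains pvMediaSuffixesB
          (PySem.Str.lower (PySem.Str.slice first (some (PySem.Str.rfind first ".")) none)) = true then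
      PySem.Str.slice first none (some (PySem.Str.rfind first "."))
    else first) := by
  have hall := pv_firstMatch_none _ _ hm
  have hcond : ¬ (PySem.Str.rfind first "." ≠ -1 ∧
      PySem.Set.contains pvMediaSuffixesB
        (PySem.Str.lower (PySem.Str.slice first (some (PySem.Str.rfind first ".")) none)) = true) := by
    rintro ⟨hne1, hctn⟩
    have hrne : PySem.Chars.rfind first.toList ['.'] ≠ -1 := by
      rw [PySem.Str.rfind_eq] at hne1
      exact hne1
    obtain ⟨k, hk, hdot, hafter⟩ := pv_rfind_pos _ hrne
    have hkk : PySem.Str.rfind first "." = ((k : Nat) : Int) := by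
      rw [PySem.Str.rfind_eq]
      exact hk
    rw [hkk] at hctn
    have hsmem := (pv_memB_iff _).mp hctn
    have hslist : (PySem.Str.lower (PySem.Str.slice first (some ((k : Nat) : Int)) none)).toList =
        List.map PySem.Chars.lowerChar (first.toList.drop k) := by
      rw [PySem.Str.toList_lower, PySem.Str.toList_slice, PySem.Chars.slice_eq_listSlice,
        PySem.List.slice_from _ (by positivity)]
      simp [PySem.Chars.lower]
    have hsuf : (PySem.Str.lower (PySem.Str.slice first (some ((k : Nat) : Int)) none)).toList <:+
        PySem.Chars.lower first.toList := by
      rw [hslist]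
      have hcomm : List.map PySem.Chars.lowerChar (first.toList.drop k) =
          (PySem.Chars.lower first.toList).drop k := by
        rw [PySem.Chars.lower, List.map_drop]
      rw [hcomm]
      exact List.drop_suffix k _
    have hends : PySem.Str.endswith (PySem.Str.lower first)
        (PySem.Str.lower (PySem.Str.slice first (some ((k : Nat) : Int)) none)) = true := by
      rw [PySem.Str.endswith_eq, PySem.Str.toList_lower, PySem.Chars.endswith,
        List.isSuffixOf_iff_suffix]
      exact hsuf
    rw [hall _ hsmem] at hends
    cases hends
  rw [if_neg hcond]

-- ===== VERDICT (by name: the statement is the Claim_ definition above) =====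
theorem stem_without_known_extension_spec : Claim_equal_stem_without_known_extension := by
  intro filename _
  unfold Spec_stem_without_known_extension
  show stem_without_known_extension filename = stem_without_known_extension_alt filename
  unfold stem_without_known_extension stem_without_known_extension_alt
  dsimp only
  rw [pv_sorted_eq]
  by_cases h : PySem.Str.strip filename = ""
  · rw [if_pos h, if_pos h]
  · rw [if_neg h, if_neg h]
    cases hm : pvFirstMatch (PySem.Str.lower (PySem.Str.strip filename)) pvSortedLit with
    | some ext =>
      exact pv_core_some _ _ hm
    | none =>
      exact pv_core_none _ hm
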